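-- pv_equiv track=rewrite | github.com/omarayyman07/PracticeAssignmentsGUC | midterm 2023 ex3.py | runtotal
-- ===== SOURCE A (Python) =====
-- def runtotal(x):
--     i=0
--     res=[]
--     count=0
--     while i<len(x):
--         if x[i]!=" ":
--             count+=1
--         else:
--             res+=[count]
--         i+=1
--     res+=[count]
--     return res
-- ===== SOURCE B (Python) =====
-- def runtotal(x):
--     res = []
--     total = 0
--     for w in x.split(" "):
--         total += len(w)
--         res.append(total)
--     return res
-- ===== Notes on version B (the rewrite author's own statement) =====
-- stated objective: idiomatic
-- what changed: B replaces A's index-based per-character loop with running counter by splitting the string into tokens (str.split, a C-level pass) and taking the running cumulative sums of the token lengths.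
import Mathlib
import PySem

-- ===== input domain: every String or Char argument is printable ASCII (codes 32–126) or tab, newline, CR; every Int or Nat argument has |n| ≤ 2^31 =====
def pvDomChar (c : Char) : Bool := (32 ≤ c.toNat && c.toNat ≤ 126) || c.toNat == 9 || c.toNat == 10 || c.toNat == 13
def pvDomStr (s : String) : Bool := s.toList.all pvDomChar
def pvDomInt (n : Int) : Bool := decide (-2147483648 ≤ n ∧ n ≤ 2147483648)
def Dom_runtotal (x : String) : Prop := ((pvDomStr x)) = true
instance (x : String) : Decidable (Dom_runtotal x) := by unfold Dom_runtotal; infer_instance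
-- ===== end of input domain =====

-- B replaces A's char-by-char counting loop by splitting on " " and taking running sums of the token lengths (simpler decomposition, same cost).

-- ===== PORT A =====
-- the while loop over indices 0..len(x)-1 with state (res, count), reading x[i]
def runtotalGo : List Char → List Int → Int → List Int
  | [], res, count => res ++ [count]
  | c :: rest, res, count =>
      if c ≠ ' ' then runtotalGo rest res (count + 1)
      else runtotalGo rest (res ++ [count]) count

def runtotal (x : String) : List Int := runtotalGo x.toList [] 0

-- ===== PORT B =====
-- x.split(" ") with the nonempty literal separator " " is PySem.Chars.splitOn on the char list;
-- then the for-loop over the tokens with state (res, total)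
def runtotal_alt (x : String) : List Int :=
  ((PySem.Chars.splitOn x.toList [' ']).foldl
    (fun (p : List Int × Int) w =>
      let t := p.2 + (w.length : Int)
      (p.1 ++ [t], t)) ([], 0)).1

-- ===== PRECONDITION & SPEC =====
def Spec_runtotal (x : String) (out : List Int) : Prop := out = runtotal_alt x
instance (x : String) (out : List Int) : Decidable (Spec_runtotal x out) := by unfold Spec_runtotal; infer_instance

-- ===== CLAIM (what is proved, stated in full; the proofs are below) =====
def Claim_equal_runtotal : Prop := ∀ (x : String), Dom_runtotal x → Spec_runtotal x (runtotal x)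

-- ===== LEMMAS AND PROOFS =====

-- the segments of a char list split at every space (proof-side model of split(" "))
def pvSegs : List Char → List (List Char)
  | [] => [[]]
  | c :: rest =>
      if c = ' ' then [] :: pvSegs rest
      else
        match pvSegs rest with
        | t :: ts => (c :: t) :: ts
        | [] => [[c]]

-- running sums of segment lengths starting from an accumulator
def pvSums : Int → List (List Char) → List Int
  | _, [] => []
  | c, t :: ts => (c + t.length) :: pvSums (c + t.length) ts

theorem pvSegs_ne_nil (cs : List Char) : pvSegs cs ≠ [] := by
  cases cs with
  | nil => simp [pvSegs]
  | cons c rest =>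
      simp only [pvSegs]
      split
      · simp
      · split <;> simp

theorem runtotalGo_eq (cs : List Char) : ∀ (res : List Int) (count : Int),
    runtotalGo cs res count = res ++ pvSums count (pvSegs cs) := by
  induction cs with
  | nil => intro res count; simp [runtotalGo, pvSegs, pvSums]
  | cons c rest ih =>
      intro res count
      by_cases h : c = ' '
      · subst h
        simp only [runtotalGo, pvSegs, ite_not]
        rw [ih]
        simp [pvSums]
      · simp only [runtotalGo, pvSegs, if_neg h, if_pos h]
        rw [ih]
        rcases hseg : pvSegs rest with _ | ⟨t, ts⟩
        · exact absurd hseg (pvSegs_ne_nil rest)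
        · simp only [pvSums]
          have h1 : count + 1 + (t.length : Int) = count + ((t.length : Int) + 1) := by ring
          simp [h1]

theorem splitOn_go_eq (cs : List Char) : ∀ (n : Nat), cs.length ≤ n →
    ∀ (cur : List Char) (acc : List (List Char)) (t : List Char) (ts : List (List Char)),
    pvSegs cs = t :: ts →
    PySem.Chars.splitOn.go [' '] (n + 1) cs cur acc
      = acc.reverse ++ (cur.reverse ++ t) :: ts := by
  induction cs with
  | nil =>
      intro n _ cur acc t ts hseg
      simp only [pvSegs] at hseg
      injection hseg with h1 h2
      subst h1; subst h2
      simp [PySem.Chars.splitOn.go]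
  | cons c rest ih =>
      intro n hn cur acc t ts hseg
      obtain ⟨m, rfl⟩ : ∃ m, n = m + 1 := by
        cases n with
        | zero => simp at hn
        | succ m => exact ⟨m, rfl⟩
      have hm : rest.length ≤ m := by simp at hn; omega
      by_cases h : c = ' '
      · subst h
        rw [show PySem.Chars.splitOn.go [' '] (m + 1 + 1) (' ' :: rest) cur acc
              = PySem.Chars.splitOn.go [' '] (m + 1) rest [] (cur.reverse :: acc) by
            simp [PySem.Chars.splitOn.go, List.isPrefixOf]]
        rw [show pvSegs (' ' :: rest) = [] :: pvSegs rest from by simp [pvSegs]] at hseg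
        injection hseg with h1 h2
        rcases hseg' : pvSegs rest with _ | ⟨t', ts'⟩
        · exact absurd hseg' (pvSegs_ne_nil rest)
        · rw [ih m hm [] (cur.reverse :: acc) t' ts' hseg']
          rw [← h1, ← h2, hseg']
          simp
      · rw [show PySem.Chars.splitOn.go [' '] (m + 1 + 1) (c :: rest) cur acc
              = PySem.Chars.splitOn.go [' '] (m + 1) rest (c :: cur) acc by
            simp [PySem.Chars.splitOn.go, List.isPrefixOf,
              beq_eq_false_iff_ne.mpr (Ne.symm h)]]
        simp only [pvSegs, if_neg h] at hseg
        rcases hseg' : pvSegs rest with _ | ⟨t', ts'⟩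
        · exact absurd hseg' (pvSegs_ne_nil rest)
        · rw [hseg'] at hseg
          simp only [List.cons.injEq] at hseg
          obtain ⟨h1, h2⟩ := hseg
          rw [ih m hm (c :: cur) acc t' ts' hseg']
          rw [← h1, ← h2]
          simp

theorem splitOn_eq_pvSegs (cs : List Char) :
    PySem.Chars.splitOn cs [' '] = pvSegs cs := by
  rcases hseg : pvSegs cs with _ | ⟨t, ts⟩
  · exact absurd hseg (pvSegs_ne_nil cs)
  · unfold PySem.Chars.splitOn
    rw [splitOn_go_eq cs cs.length le_rfl [] [] t ts hseg]
    simp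

theorem foldl_eq_pvSums (ts : List (List Char)) : ∀ (res : List Int) (c : Int),
    ((ts.foldl (fun (p : List Int × Int) w =>
        let t := p.2 + (w.length : Int)
        (p.1 ++ [t], t)) (res, c)).1) = res ++ pvSums c ts := by
  induction ts with
  | nil => intro res c; simp [pvSums]
  | cons t ts ih => intro res c; simp only [List.foldl_cons, pvSums]; rw [ih]; simp

-- ===== VERDICT (by name: the statement is the Claim_ definition above) =====
theorem runtotal_spec : Claim_equal_runtotal := by
  intro x _
  unfold Spec_runtotal runtotal runtotal_alt
  rw [runtotalGo_eq, splitOn_eq_pvSegs, foldl_eq_pvSums]
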